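-- pv_equiv track=rewrite | github.com/MalyshevValery/Demo_XRay_API | process.py | pred2str
-- ===== SOURCE A (Python) =====
-- def pred2str(predictions, items_per_row=3):
--     rows = []
--
--     i = 0
--     row = ''
--     for class_name in predictions:
--         row += class_name + '=' + str(predictions[class_name])
--         i += 1
--
--         if i % items_per_row != 0:
--             row += ', '
--         else:
--             rows.append(row)
--             row = ''
--
--     if row:
--         rows.append(row)
--
--     return '\n'.join(rows)
-- ===== SOURCE B (Python) =====
-- def pred2str(predictions, items_per_row=3):
--     # Build all items first, then chunk: full chunks become rows; a short
--     # trailing chunk keeps the original's trailing ', '.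
--     items = [name + '=' + str(predictions[name]) for name in predictions]
--     rows = []
--     while len(items) >= items_per_row:
--         rows.append(', '.join(items[:items_per_row]))
--         items = items[items_per_row:]
--     if items:
--         rows.append(', '.join(items) + ', ')
--     return '\n'.join(rows)
-- ===== Notes on version B (the rewrite author's own statement) =====
-- stated objective: alternative
-- what changed: A formats in one accumulating pass with a modulo row counter; B first builds the full list of 'name=value' items and then chunks it by slicing items_per_row at a time, joining each chunk with ', ' and giving the short trailing chunk the original's trailing ', '.
-- outside the precondition, e.g. on pred2str({'a': '1'}, -2): A returns 'a=1, ', B does not finish within the time limit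
import Mathlib
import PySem

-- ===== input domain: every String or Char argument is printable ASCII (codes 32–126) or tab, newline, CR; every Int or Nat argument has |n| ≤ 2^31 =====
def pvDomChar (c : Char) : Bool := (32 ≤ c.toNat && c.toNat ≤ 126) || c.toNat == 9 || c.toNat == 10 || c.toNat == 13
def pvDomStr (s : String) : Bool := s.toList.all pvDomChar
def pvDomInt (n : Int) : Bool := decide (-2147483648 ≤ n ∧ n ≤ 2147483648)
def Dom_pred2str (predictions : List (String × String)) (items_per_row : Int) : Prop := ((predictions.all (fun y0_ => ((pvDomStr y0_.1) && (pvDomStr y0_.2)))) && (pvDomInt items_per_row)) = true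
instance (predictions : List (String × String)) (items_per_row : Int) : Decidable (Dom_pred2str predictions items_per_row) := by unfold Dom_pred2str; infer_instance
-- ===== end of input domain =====

-- B restructures A's single accumulating pass (modulo row counter) into build-all-items then chunk-by-slicing; same return value on Pre_ (items_per_row > 0).

-- ===== PORT A =====
-- loop body of A's 'for class_name in predictions' (state: rows, i, row)
def pred2strStep (items_per_row : Int) (st : List String × Int × String) (kv : String × String) :
    List String × Int × String :=
  let row := st.2.2 ++ kv.1 ++ "=" ++ kv.2
  let i := st.2.1 + 1
  if PySem.Int.mod i items_per_row ≠ 0 then (st.1, i, row ++ ", ")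
  else (st.1 ++ [row], i, "")

def pred2str (predictions : List (String × String)) (items_per_row : Int) : String :=
  let st := predictions.foldl (pred2strStep items_per_row) ([], 0, "")
  let rows := if st.2.2 ≠ "" then st.1 ++ [st.2.2] else st.1
  PySem.Str.join "\n" rows

-- ===== PORT B =====
-- B's 'while len(items) >= items_per_row' chunking loop; fuel = initial item count
-- (enough, since each iteration drops items_per_row ≥ 1 items on Pre_); returns (rows, leftover items)
def pred2strLoop (items_per_row : Int) : Nat → List String → List String → List String × List String
  | 0, items, rows => (rows, items)
  | fuel + 1, items, rows =>
    if items_per_row ≤ (items.length : Int) then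
      pred2strLoop items_per_row fuel (PySem.List.slice items (some items_per_row) none)
        (rows ++ [PySem.Str.join ", " (PySem.List.slice items none (some items_per_row))])
    else (rows, items)

def pred2str_alt (predictions : List (String × String)) (items_per_row : Int) : String :=
  let items := predictions.map (fun kv => kv.1 ++ "=" ++ kv.2)
  let p := pred2strLoop items_per_row items.length items []
  let rows := if p.2 ≠ [] then p.1 ++ [PySem.Str.join ", " p.2 ++ ", "] else p.1
  PySem.Str.join "\n" rows

-- ===== PRECONDITION & SPEC =====
-- Pre_ restricts to positive row width, the function's natural domain: A raises
-- ZeroDivisionError at items_per_row = 0, and for negative items_per_row B's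
-- chunking loop diverges (negative counts are outside the task's domain).
def Pre_pred2str (_predictions : List (String × String)) (items_per_row : Int) : Prop :=
  0 < items_per_row
instance (predictions : List (String × String)) (items_per_row : Int) : Decidable (Pre_pred2str predictions items_per_row) := by unfold Pre_pred2str; infer_instance

def pvWitness_pred2str : (List (String × String)) × Int := ([("cat", "0.7"), ("dog", "0.2")], 3)

def Spec_pred2str (predictions : List (String × String)) (items_per_row : Int) (out : String) : Prop := out = pred2str_alt predictions items_per_row
instance (predictions : List (String × String)) (items_per_row : Int) (out : String) : Decidable (Spec_pred2str predictions items_per_row out) := by unfold Spec_pred2str; infer_instance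

-- ===== CLAIM (what is proved, stated in full; the proofs are below) =====
def Claim_equal_pred2str : Prop := ∀ (predictions : List (String × String)) (items_per_row : Int), Dom_pred2str predictions items_per_row → Pre_pred2str predictions items_per_row → Spec_pred2str predictions items_per_row (pred2str predictions items_per_row)

-- ===== LEMMAS AND PROOFS =====

-- canonical row list both ports are reduced to (fuel ≥ number of items)
def cRows (m : Int) : Nat → List String → List String
  | _, [] => []
  | 0, _ :: _ => []
  | fuel + 1, x :: t =>
    if ((x :: t).length : Int) < m then [PySem.Str.join ", " (x :: t) ++ ", "]
    else PySem.Str.join ", " ((x :: t).take m.toNat) :: cRows m fuel ((x :: t).drop m.toNat)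

-- A's per-item step, after fusing the 'name=value' formatting into the item
def stepS (m : Int) (st : List String × Int × String) (x : String) : List String × Int × String :=
  let row := st.2.2 ++ x
  let i := st.2.1 + 1
  if PySem.Int.mod i m ≠ 0 then (st.1, i, row ++ ", ")
  else (st.1 ++ [row], i, "")

theorem step_eq (m : Int) (st : List String × Int × String) (kv : String × String) :
    pred2strStep m st kv = stepS m st (kv.1 ++ "=" ++ kv.2) := by
  simp [pred2strStep, stepS, String.append_assoc]

theorem join_singleton (x : String) : PySem.Str.join ", " [x] = x := by
  apply String.toList_injective
  simp [PySem.Str.toList_join, PySem.Chars.join, List.intercalate]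

theorem join_cons_cons (x y : String) (t : List String) :
    PySem.Str.join ", " (x :: y :: t) = x ++ ", " ++ PySem.Str.join ", " (y :: t) := by
  apply String.toList_injective
  simp [PySem.Str.toList_join, PySem.Chars.join_cons_cons]

-- the comma-accumulating fold, generalized over the accumulated prefix
theorem foldl_acc_partial : ∀ (t : List String) (r : String), t ≠ [] →
    t.foldl (fun r x => r ++ x ++ ", ") r = r ++ PySem.Str.join ", " t ++ ", " := by
  intro t
  induction t with
  | nil => intro r h; exact absurd rfl h
  | cons x s ih =>
    intro r _
    cases s with
    | nil => simp [List.foldl, join_singleton]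
    | cons y u =>
      rw [List.foldl_cons, ih (r ++ x ++ ", ") (by simp), join_cons_cons]
      simp [String.append_assoc]

theorem foldl_acc_last : ∀ (c : List String) (r : String) (h : c ≠ []),
    c.dropLast.foldl (fun r x => r ++ x ++ ", ") r ++ c.getLast h = r ++ PySem.Str.join ", " c := by
  intro c
  induction c with
  | nil => intro r h; exact absurd rfl h
  | cons x s ih =>
    intro r _
    cases s with
    | nil => simp [join_singleton]
    | cons y u =>
      have hne : y :: u ≠ [] := by simp
      rw [List.dropLast_cons_of_ne_nil hne, List.getLast_cons hne, List.foldl_cons,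
        ih (r ++ x ++ ", ") hne, join_cons_cons]
      simp [String.append_assoc]

-- mod bookkeeping for positive m
theorem mod_succ_ne (m i : Int) (hm : 0 < m) (h : PySem.Int.mod i m + 1 < m) :
    PySem.Int.mod (i + 1) m = PySem.Int.mod i m + 1 := by
  simp only [PySem.Int.mod_eq_emod_of_pos hm] at *
  have hq := Int.mul_ediv_add_emod i m
  have h0 : 0 ≤ i % m := Int.emod_nonneg i (by omega)
  have h2 : i + 1 = (i % m + 1) + m * (i / m) := by omega
  rw [h2, Int.add_mul_emod_self_left, Int.emod_eq_of_lt (by omega) (by omega)]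

theorem mod_succ_zero (m i : Int) (hm : 0 < m) (h : PySem.Int.mod i m + 1 = m) :
    PySem.Int.mod (i + 1) m = 0 := by
  simp only [PySem.Int.mod_eq_emod_of_pos hm] at *
  have hq := Int.mul_ediv_add_emod i m
  have h2 : i + 1 = m * (i / m + 1) := by ring_nf; omega
  rw [h2]; exact Int.mul_emod_right m _

theorem mod_add_self (m i : Int) (hm : 0 < m) (h : PySem.Int.mod i m = 0) :
    PySem.Int.mod (i + m) m = 0 := by
  simp only [PySem.Int.mod_eq_emod_of_pos hm] at *
  rw [show i + m = i + m * 1 by ring, Int.add_mul_emod_self_left]; exact h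

theorem mod_nonneg' (m i : Int) (hm : 0 < m) : 0 ≤ PySem.Int.mod i m := by
  rw [PySem.Int.mod_eq_emod_of_pos hm]; exact Int.emod_nonneg i (by omega)

-- a block that stays strictly inside a row: only the row string grows
theorem stepS_partial (m : Int) (hm : 0 < m) :
    ∀ (xs : List String) (i : Int) (row : String) (rows : List String),
    PySem.Int.mod i m + (xs.length : Int) < m →
    xs.foldl (stepS m) (rows, i, row) =
      (rows, i + xs.length, xs.foldl (fun r x => r ++ x ++ ", ") row) := by
  intro xs
  induction xs with
  | nil => intro i row rows _; simp
  | cons x t ih =>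
    intro i row rows h
    have h0 : 0 ≤ PySem.Int.mod i m := mod_nonneg' m i hm
    have hlt : PySem.Int.mod i m + 1 < m := by
      simp only [List.length_cons] at h; push_cast at h; omega
    have hmod := mod_succ_ne m i hm hlt
    rw [List.foldl_cons, show stepS m (rows, i, row) x = (rows, i + 1, row ++ x ++ ", ") by
      simp [stepS, hmod]; omega]
    rw [ih (i + 1) (row ++ x ++ ", ") rows (by
      rw [hmod]; simp only [List.length_cons] at h ⊢; push_cast at h ⊢; omega)]
    have harith : i + 1 + (t.length : Int) = i + ((t.length : Int) + 1) := by ring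
    simp [harith]

-- a block that exactly finishes a row: it is flushed to rows
theorem stepS_finish (m : Int) (hm : 0 < m) :
    ∀ (xs : List String) (x : String) (i : Int) (row : String) (rows : List String),
    PySem.Int.mod i m + (xs.length : Int) + 1 = m →
    (xs ++ [x]).foldl (stepS m) (rows, i, row) =
      (rows ++ [xs.foldl (fun r y => r ++ y ++ ", ") row ++ x], i + xs.length + 1, "") := by
  intro xs
  induction xs with
  | nil =>
    intro x i row rows h
    have hz : PySem.Int.mod (i + 1) m = 0 := mod_succ_zero m i hm (by simp at h; omega)
    simp only [List.nil_append, List.foldl_cons, List.foldl_nil, stepS, hz]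
    simp
  | cons y t ih =>
    intro x i row rows h
    have h0 : 0 ≤ PySem.Int.mod i m := mod_nonneg' m i hm
    have hlt : PySem.Int.mod i m + 1 < m := by
      simp only [List.length_cons] at h; push_cast at h; omega
    have hmod := mod_succ_ne m i hm hlt
    rw [List.cons_append, List.foldl_cons, show stepS m (rows, i, row) y = (rows, i + 1, row ++ y ++ ", ") by
      simp [stepS, hmod]; omega]
    rw [ih x (i + 1) (row ++ y ++ ", ") rows (by
      rw [hmod]; simp only [List.length_cons] at h ⊢; push_cast at h ⊢; omega)]
    have harith : i + 1 + (t.length : Int) = i + ((t.length : Int) + 1) := by ring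
    simp [harith]

-- A's whole loop (over already-formatted items) computes cRows
theorem A_loop (m : Int) (hm : 0 < m) :
    ∀ (fuel : Nat) (xs : List String) (rows : List String) (i : Int),
    PySem.Int.mod i m = 0 → xs.length ≤ fuel →
    (let st := xs.foldl (stepS m) (rows, i, "")
     if st.2.2 ≠ "" then st.1 ++ [st.2.2] else st.1) = rows ++ cRows m fuel xs := by
  intro fuel
  induction fuel with
  | zero =>
    intro xs rows i hi hlen
    have : xs = [] := List.eq_nil_of_length_eq_zero (by omega)
    subst this; simp [cRows]
  | succ fuel ih =>
    intro xs rows i hi hlen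
    cases xs with
    | nil => simp [cRows]
    | cons x t =>
      by_cases hlt : (((x :: t).length : Nat) : Int) < m
      · -- one short (final) row
        rw [stepS_partial m hm (x :: t) i "" rows (by rw [hi]; omega)]
        have hne : x :: t ≠ [] := by simp
        rw [foldl_acc_partial (x :: t) "" hne]
        have hnz : "" ++ PySem.Str.join ", " (x :: t) ++ ", " ≠ "" := by
          intro hcon
          have := congrArg String.length hcon
          simp [String.length_append] at this
        rw [if_pos hnz, String.empty_append]
        simp only [cRows]
        rw [if_pos hlt]
      · -- one full row, then recurse
        rw [not_lt] at hlt
        have hmt : 1 ≤ m.toNat := by omega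
        have hmle : m.toNat ≤ (x :: t).length := by
          have := (x :: t).length; omega
        have hsplit : x :: t = (x :: t).take m.toNat ++ (x :: t).drop m.toNat :=
          (List.take_append_drop m.toNat (x :: t)).symm
        set c := (x :: t).take m.toNat with hc
        have hclen : c.length = m.toNat := by
          rw [hc, List.length_take]; omega
        have hcne : c ≠ [] := by
          intro hcon; rw [hcon] at hclen; simp at hclen; omega
        have hcsplit : c = c.dropLast ++ [c.getLast hcne] := (List.dropLast_append_getLast hcne).symm
        rw [hsplit, List.foldl_append]
        rw [hcsplit, stepS_finish m hm c.dropLast (c.getLast hcne) i "" rows (by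
          rw [hi, List.length_dropLast, hclen]
          omega)]
        rw [foldl_acc_last c "" hcne, String.empty_append]
        have hi2 : PySem.Int.mod (i + ↑c.dropLast.length + 1) m = 0 := by
          have : (↑c.dropLast.length + 1 : Int) = m := by
            rw [List.length_dropLast, hclen]; omega
          rw [add_assoc, this]
          exact mod_add_self m i hm hi
        rw [ih ((x :: t).drop m.toNat) (rows ++ [PySem.Str.join ", " c]) _ hi2 (by
          rw [List.length_drop]; simp only [List.length_cons] at hlen ⊢; omega)]
        rw [List.append_assoc]
        have hcr : cRows m (fuel + 1) (x :: t)
            = PySem.Str.join ", " c :: cRows m fuel ((x :: t).drop m.toNat) := by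
          simp only [cRows]
          rw [if_neg (by omega)]
        rw [← hcsplit, ← hsplit, hcr]
        rfl

-- B's whole loop computes cRows as well
theorem B_loop (m : Int) (hm : 0 < m) :
    ∀ (fuel : Nat) (xs : List String) (rows : List String),
    xs.length ≤ fuel →
    (let p := pred2strLoop m fuel xs rows
     if p.2 ≠ [] then p.1 ++ [PySem.Str.join ", " p.2 ++ ", "] else p.1) = rows ++ cRows m fuel xs := by
  intro fuel
  induction fuel with
  | zero =>
    intro xs rows hlen
    have : xs = [] := List.eq_nil_of_length_eq_zero (by omega)
    subst this; simp [pred2strLoop, cRows]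
  | succ fuel ih =>
    intro xs rows hlen
    by_cases hle : m ≤ (xs.length : Int)
    · have hxs : xs ≠ [] := by
        intro hcon; subst hcon; simp at hle; omega
      obtain ⟨x, t, rfl⟩ := List.exists_cons_of_ne_nil hxs
      simp only [pred2strLoop, if_pos hle]
      rw [PySem.List.slice_from _ (le_of_lt hm), PySem.List.slice_to _ (le_of_lt hm)]
      rw [ih ((x :: t).drop m.toNat) _ (by
        rw [List.length_drop]; simp only [List.length_cons] at hlen ⊢; omega)]
      rw [List.append_assoc]
      have hcr : cRows m (fuel + 1) (x :: t)
          = PySem.Str.join ", " ((x :: t).take m.toNat) :: cRows m fuel ((x :: t).drop m.toNat) := by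
        simp only [cRows]
        rw [if_neg (by omega)]
      rw [hcr]
      rfl
    · simp only [pred2strLoop, if_neg hle]
      cases xs with
      | nil => simp [cRows]
      | cons x t =>
        simp only [ne_eq, reduceCtorEq, not_false_iff, if_pos]
        simp only [cRows]
        rw [if_pos (show (((x :: t).length : Nat) : Int) < m by omega)]

-- ===== VERDICT (by name: the statement is the Claim_ definition above) =====
theorem pred2str_spec : Claim_equal_pred2str := by
  intro predictions m _ hpre
  unfold Spec_pred2str pred2str pred2str_alt
  have hfold : predictions.foldl (pred2strStep m) ([], 0, "") =
      (predictions.map (fun kv => kv.1 ++ "=" ++ kv.2)).foldl (stepS m) ([], 0, "") := by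
    rw [List.foldl_map]
    congr 1
    funext st kv
    exact step_eq m st kv
  set items := predictions.map (fun kv => kv.1 ++ "=" ++ kv.2) with hitems
  have hA := A_loop m hpre items.length items [] 0 (by
    rw [PySem.Int.mod_eq_emod_of_pos hpre]; simp) (le_refl _)
  have hB := B_loop m hpre items.length items [] (le_refl _)
  simp only [List.nil_append] at hA hB
  simp only [hfold]
  rw [hA, hB]
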